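-- pv_equiv track=rewrite | github.com/Sora-mmh/Leetcode-Problems-Across-All-Patterns | math/Find_Triangular_Sum_of_an_Array.py | triangularSum
-- ===== SOURCE A (Python) =====
-- from typing import List
--
-- def triangularSum(nums: List[int]) -> int:
--     def helper(nums):
--         if len(nums) == 1:
--             return nums[0]
--         new_nums = []
--         for idx in range(1, len(nums)):
--             new_nums.append((nums[idx - 1] + nums[idx]) % 10)
--         return helper(new_nums)
--     return helper(nums)
-- ===== SOURCE B (Python) =====
-- def triangularSum(nums):
--     # Closed form: the triangular process is Pascal's triangle, so for n >= 2 the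
--     # answer is sum(C(n-1, i) * nums[i]) mod 10; the binomial coefficient is kept
--     # exactly via the running product/exact-division recurrence.
--     n = len(nums)
--     if n == 1:
--         return nums[0]
--     total = 0
--     c = 1
--     for i, x in enumerate(nums):
--         total = (total + c * x) % 10
--         c = c * (n - 1 - i) // (i + 1)
--     return total
-- ===== Notes on version B (the rewrite author's own statement) =====
-- stated objective: faster
-- what changed: A repeatedly rebuilds the whole array with pairwise sums mod 10 (quadratic); B computes the closed form sum(C(n-1,i)*nums[i]) mod 10 in one pass, maintaining the binomial coefficient by the exact multiply/divide recurrence.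
-- outside the precondition, e.g. on triangularSum([]): A raises RecursionError, B returns 0
import Mathlib
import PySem

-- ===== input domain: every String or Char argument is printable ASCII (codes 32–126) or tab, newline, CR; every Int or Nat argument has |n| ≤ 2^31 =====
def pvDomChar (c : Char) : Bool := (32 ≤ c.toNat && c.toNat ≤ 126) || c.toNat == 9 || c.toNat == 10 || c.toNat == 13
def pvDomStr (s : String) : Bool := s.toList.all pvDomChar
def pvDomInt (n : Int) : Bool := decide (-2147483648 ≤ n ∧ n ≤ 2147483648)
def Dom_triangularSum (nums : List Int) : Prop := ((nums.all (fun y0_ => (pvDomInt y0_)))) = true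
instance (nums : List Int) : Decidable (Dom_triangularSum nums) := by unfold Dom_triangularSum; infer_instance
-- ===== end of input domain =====

-- B replaces A's quadratic repeated pairwise collapse by the closed form
-- sum C(n-1,i)*nums[i] mod 10 with a running exact-division binomial coefficient (faster, measured).

-- ===== PORT A =====
-- one collapse pass: new_nums = [(nums[idx-1]+nums[idx]) % 10 for idx in range(1, len(nums))]
def stepA (nums : List Int) : List Int :=
  (PySem.List.pyRange 1 nums.length 1).foldl
    (fun new_nums idx =>
      new_nums ++ [PySem.Int.mod (PySem.List.pyGetD nums (idx - 1) 0 + PySem.List.pyGetD nums idx 0) 10])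
    []

-- fuel = nums.length suffices: each recursive call shortens the list by one (Python recurses unboundedly on [])
def helperA : Nat → List Int → Int
  | 0, nums => PySem.List.pyGetD nums 0 0
  | fuel + 1, nums =>
    if nums.length == 1 then PySem.List.pyGetD nums 0 0
    else helperA fuel (stepA nums)

def triangularSum (nums : List Int) : Int := helperA nums.length nums

-- ===== PORT B =====
def triangularSum_alt (nums : List Int) : Int :=
  let n := nums.length
  if n == 1 then PySem.List.pyGetD nums 0 0
  else
    (nums.foldl
      (fun (st : Int × Int × Int) (x : Int) =>
        (PySem.Int.mod (st.1 + st.2.1 * x) 10,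
         PySem.Int.floordiv (st.2.1 * ((n : Int) - 1 - st.2.2)) (st.2.2 + 1),
         st.2.2 + 1))
      (0, 1, 0)).1

-- ===== PRECONDITION & SPEC =====
-- Pre_ excludes only []: there A recurses forever (RecursionError), returning no value.
def Pre_triangularSum (nums : List Int) : Prop := nums ≠ []
instance (nums : List Int) : Decidable (Pre_triangularSum nums) := by unfold Pre_triangularSum; infer_instance
def pvWitness_triangularSum : List Int := [3, 17, -4]
def Spec_triangularSum (nums : List Int) (out : Int) : Prop := out = triangularSum_alt nums
instance (nums : List Int) (out : Int) : Decidable (Spec_triangularSum nums out) := by unfold Spec_triangularSum; infer_instance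

-- ===== CLAIM (what is proved, stated in full; the proofs are below) =====
def Claim_equal_triangularSum : Prop := ∀ (nums : List Int), Dom_triangularSum nums → Pre_triangularSum nums → Spec_triangularSum nums (triangularSum nums)

-- ===== LEMMAS AND PROOFS =====

-- weighted binomial sum: the value the triangular process computes (mod 10)
def W (xs : List Int) : Int :=
  ∑ k ∈ Finset.range xs.length, ((xs.length - 1).choose k : Int) * xs.getD k 0

lemma stepA_eq (xs : List Int) :
    stepA xs = (List.range (xs.length - 1)).map
      (fun k => (xs.getD k 0 + xs.getD (k + 1) 0) % 10) := by
  unfold stepA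
  rw [PySem.List.pyRange_one, PySem.List.foldl_append_singleton_eq_map, List.map_map]
  simp only [List.nil_append]
  have h1 : ((xs.length : Int) - 1).toNat = xs.length - 1 := by omega
  rw [h1]
  apply List.map_congr_left
  intro k hk
  simp only [Function.comp]
  have e1 : (1 : Int) + (k : Int) - 1 = ((k : ℕ) : Int) := by omega
  have e2 : (1 : Int) + (k : Int) = ((k + 1 : ℕ) : Int) := by omega
  rw [e1, e2, PySem.Int.mod_eq_emod_of_pos (by norm_num), PySem.List.pyGetD_natCast,
    PySem.List.pyGetD_natCast]

lemma length_stepA (xs : List Int) : (stepA xs).length = xs.length - 1 := by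
  simp [stepA_eq]

lemma getD_stepA (xs : List Int) (k : ℕ) (hk : k < xs.length - 1) :
    (stepA xs).getD k 0 = (xs.getD k 0 + xs.getD (k + 1) 0) % 10 := by
  rw [stepA_eq]
  simp [List.getD, hk]

lemma mem_stepA (xs : List Int) (y : Int) (hy : y ∈ stepA xs) : 0 ≤ y ∧ y < 10 := by
  rw [stepA_eq] at hy
  simp only [List.mem_map, List.mem_range] at hy
  obtain ⟨k, -, rfl⟩ := hy
  exact ⟨Int.emod_nonneg _ (by norm_num), Int.emod_lt_of_pos _ (by norm_num)⟩

lemma pascal_sum (t : ℕ) (x : ℕ → ℤ) :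
    ∑ k ∈ Finset.range (t + 1), (t.choose k : ℤ) * (x k + x (k + 1))
      = ∑ j ∈ Finset.range (t + 2), ((t + 1).choose j : ℤ) * x j := by
  have hR : ∑ j ∈ Finset.range (t + 2), ((t + 1).choose j : ℤ) * x j
      = (∑ j ∈ Finset.range (t + 1), ((t + 1).choose (j + 1) : ℤ) * x (j + 1)) + x 0 := by
    rw [Finset.sum_range_succ' (fun j => ((t + 1).choose j : ℤ) * x j) (t + 1)]
    simp
  have hL1 : ∑ k ∈ Finset.range (t + 1), (t.choose k : ℤ) * x k
      = (∑ k ∈ Finset.range t, (t.choose (k + 1) : ℤ) * x (k + 1)) + x 0 := by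
    rw [Finset.sum_range_succ' (fun k => (t.choose k : ℤ) * x k) t]
    simp
  have hext : ∑ k ∈ Finset.range (t + 1), (t.choose (k + 1) : ℤ) * x (k + 1)
      = ∑ k ∈ Finset.range t, (t.choose (k + 1) : ℤ) * x (k + 1) := by
    rw [Finset.sum_range_succ]
    simp [Nat.choose_succ_self]
  calc ∑ k ∈ Finset.range (t + 1), (t.choose k : ℤ) * (x k + x (k + 1))
      = (∑ k ∈ Finset.range (t + 1), (t.choose k : ℤ) * x k)
        + ∑ k ∈ Finset.range (t + 1), (t.choose k : ℤ) * x (k + 1) := by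
        simp [mul_add, Finset.sum_add_distrib]
    _ = ∑ j ∈ Finset.range (t + 2), ((t + 1).choose j : ℤ) * x j := by
        rw [hL1, hext.symm, hR]
        simp only [Nat.choose_succ_succ, Nat.cast_add, add_mul, Finset.sum_add_distrib]
        ring

lemma W_stepA (xs : List Int) (h : 2 ≤ xs.length) : W (stepA xs) % 10 = W xs % 10 := by
  obtain ⟨t, ht⟩ : ∃ t, xs.length = t + 2 := ⟨xs.length - 2, by omega⟩
  unfold W
  rw [length_stepA, ht]
  have h1 : t + 2 - 1 - 1 = t := by omega
  have h2 : t + 2 - 1 = t + 1 := by omega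
  rw [h1, h2]
  have hterm : ∀ k ∈ Finset.range (t + 1),
      (t.choose k : ℤ) * (stepA xs).getD k 0 % 10
        = (t.choose k : ℤ) * (xs.getD k 0 + xs.getD (k + 1) 0) % 10 := by
    intro k hk
    rw [getD_stepA xs k (by simp only [Finset.mem_range] at hk; omega)]
    conv_lhs => rw [Int.mul_emod]
    conv_rhs => rw [Int.mul_emod]
    rw [Int.emod_emod_of_dvd _ dvd_rfl]
  rw [Finset.sum_int_mod, Finset.sum_congr rfl hterm, ← Finset.sum_int_mod, pascal_sum]

lemma helperA_eq_W (fuel : ℕ) : ∀ (xs : List Int), 1 ≤ xs.length → xs.length ≤ fuel + 1 →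
    (∀ y ∈ xs, 0 ≤ y ∧ y < 10) → helperA fuel xs = W xs % 10 := by
  induction fuel with
  | zero =>
    intro xs h1 h2 hmem
    have hx1 : xs.length = 1 := by omega
    obtain ⟨a, rfl⟩ := List.length_eq_one_iff.mp hx1
    have := hmem a (by simp)
    simp [helperA, PySem.List.pyGetD_zero, W, Int.emod_eq_of_lt this.1 this.2]
  | succ f ih =>
    intro xs h1 h2 hmem
    by_cases hone : xs.length = 1
    · obtain ⟨a, rfl⟩ := List.length_eq_one_iff.mp hone
      have := hmem a (by simp)
      simp [helperA, PySem.List.pyGetD_zero, W, Int.emod_eq_of_lt this.1 this.2]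
    · have hlen : 2 ≤ xs.length := by omega
      have hstep : helperA (f + 1) xs = helperA f (stepA xs) := by
        simp [helperA, hone]
      rw [hstep, ih (stepA xs) (by rw [length_stepA]; omega) (by rw [length_stepA]; omega)
        (fun y hy => mem_stepA xs y hy), W_stepA xs hlen]

lemma foldB (n : ℕ) : ∀ (ys : List Int) (i : ℕ) (t : Int), i + ys.length = n →
    ((ys.foldl
      (fun (st : Int × Int × Int) (x : Int) =>
        (PySem.Int.mod (st.1 + st.2.1 * x) 10,
         PySem.Int.floordiv (st.2.1 * ((n : Int) - 1 - st.2.2)) (st.2.2 + 1),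
         st.2.2 + 1))
      ((t % 10 : Int), ((n - 1).choose i : Int), (i : Int))).1)
      = (t + ∑ k ∈ Finset.range ys.length, ((n - 1).choose (i + k) : Int) * ys.getD k 0) % 10 := by
  intro ys
  induction ys with
  | nil => intro i t _; simp
  | cons y tl ih =>
    intro i t hn
    have hi : i ≤ n - 1 := by simp at hn; omega
    have hn1 : 1 ≤ n := by simp at hn; omega
    have e1 : PySem.Int.mod ((t % 10) + ((n - 1).choose i : Int) * y) 10
        = (t + ((n - 1).choose i : Int) * y) % 10 := by
      rw [PySem.Int.mod_eq_emod_of_pos (by norm_num), Int.emod_add_emod]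
    have ecast : (n : Int) - 1 - (i : Int) = (((n - 1) - i : ℕ) : Int) := by omega
    have e2 : PySem.Int.floordiv (((n - 1).choose i : Int) * ((n : Int) - 1 - (i : Int))) (((i + 1 : ℕ) : Int))
        = ((n - 1).choose (i + 1) : Int) := by
      rw [ecast]
      have hch : (n - 1).choose i * ((n - 1) - i) = (n - 1).choose (i + 1) * (i + 1) :=
        (Nat.choose_succ_right_eq (n - 1) i).symm
      have hc : (((n - 1).choose i : Int)) * (((n - 1) - i : ℕ) : Int)
          = ((n - 1).choose (i + 1) : Int) * (((i + 1 : ℕ) : Int)) := by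
        exact_mod_cast hch
      rw [hc, PySem.Int.floordiv_eq_ediv_of_pos (by positivity),
        Int.mul_ediv_cancel _ (by positivity)]
    have e3 : (i : Int) + 1 = ((i + 1 : ℕ) : Int) := by omega
    simp only [List.foldl_cons, e1, e3, e2]
    rw [ih (i + 1) (t + ((n - 1).choose i : Int) * y) (by simp at hn ⊢; omega)]
    congr 1
    simp only [List.length_cons]
    rw [Finset.sum_range_succ' (fun k => (((n - 1).choose (i + k) : ℕ) : Int) * (y :: tl).getD k 0) tl.length]
    simp only [List.getD_cons_succ, List.getD_cons_zero, Nat.add_zero]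
    have hsum : ∑ k ∈ Finset.range tl.length, (((n - 1).choose (i + (k + 1)) : ℕ) : Int) * tl.getD k 0
        = ∑ k ∈ Finset.range tl.length, (((n - 1).choose (i + 1 + k) : ℕ) : Int) * tl.getD k 0 :=
      Finset.sum_congr rfl (fun k _ => by rw [show i + (k + 1) = i + 1 + k from by omega])
    rw [hsum]
    ring

-- ===== VERDICT (by name: the statement is the Claim_ definition above) =====
theorem triangularSum_spec : Claim_equal_triangularSum := by
  intro nums _ hpre
  unfold Spec_triangularSum triangularSum triangularSum_alt
  have hn1 : 1 ≤ nums.length := by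
    cases nums with
    | nil => exact absurd rfl hpre
    | cons a l => simp
  by_cases hone : nums.length = 1
  · obtain ⟨a, rfl⟩ := List.length_eq_one_iff.mp hone
    simp [helperA]
  · have hlen : 2 ≤ nums.length := by omega
    have hbeq : (nums.length == 1) = false := by simp [hone]
    -- A side
    have hA : helperA nums.length nums = W nums % 10 := by
      obtain ⟨f, hf⟩ : ∃ f, nums.length = f + 1 := ⟨nums.length - 1, by omega⟩
      rw [hf]
      have : helperA (f + 1) nums = helperA f (stepA nums) := by
        simp [helperA, hone]
      rw [this, helperA_eq_W f (stepA nums) (by rw [length_stepA]; omega)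
        (by rw [length_stepA]; omega) (fun y hy => mem_stepA nums y hy), W_stepA nums hlen]
    rw [hA]
    -- B side
    simp only [hbeq, Bool.false_eq_true, if_false]
    have h0 : ((0 : Int), (1 : Int), (0 : Int))
        = (((0 : Int) % 10), (((nums.length - 1).choose 0 : ℕ) : Int), ((0 : ℕ) : Int)) := by
      norm_num
    rw [h0, foldB nums.length nums 0 0 (by omega)]
    unfold W
    norm_num
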